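-- pv_equiv track=rewrite | github.com/Jinwoongma/Algorithm | test/line_2020/problem2.py | solution
-- ===== SOURCE A (Python) =====
-- def solution(answer_sheet, sheets):
--     answer = -1
--     for i in range(len(sheets)):
--         for j in range(len(sheets)):
--             if j <= i: continue
--             doubt = 0
--             cnt = 0
--             continuity = 0
--             flag = False
--             for k in range(len(answer_sheet)):
--                 if sheets[i][k] != sheets[j][k]:
--                     flag = False
--                     cnt = 0
--                     continue  # 문제 답이 다를 떄
--                 if answer_sheet[k] != sheets[i][k]:  # 문제도 틀리고 답이 같을 때
--                     if flag:
--                         cnt += 1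
--                         doubt += 1
--                     else:
--                         doubt += 1
--                         cnt = 1
--                         flag = True
--                 else:
--                     flag = False
--                     cnt = 0
--                 continuity = max(continuity, cnt)
--             answer = max(answer, doubt + (continuity ** 2))
--     return answer
-- ===== SOURCE B (Python) =====
-- def _run_lengths(hit):
--     runs = []
--     cur = 0
--     for h in hit:
--         if h:
--             cur += 1
--         else:
--             if cur != 0:
--                 runs.append(cur)
--             cur = 0
--     if cur != 0:
--         runs.append(cur)
--     return runs
--
--
-- def solution(answer_sheet, sheets):
--     n = len(sheets)
--     best = -1
--     for i in range(n):
--         for j in range(i + 1, n):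
--             hit = [sheets[i][k] == sheets[j][k] and answer_sheet[k] != sheets[i][k]
--                    for k in range(len(answer_sheet))]
--             doubt = hit.count(True)
--             continuity = max([0] + _run_lengths(hit))
--             best = max(best, doubt + continuity ** 2)
--     return best
-- ===== Notes on version B (the rewrite author's own statement) =====
-- stated objective: simpler
-- what changed: Replaces A's four-variable single-pass state machine (doubt/cnt/continuity/flag with branch-dependent resets) by first materialising a boolean hit list per pair and then computing doubt as a count and continuity as the maximum of the list of run lengths; the j-loop iterates range(i+1,n) directly instead of scanning all j with a 'j <= i: continue' guard.
import Mathlib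
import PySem

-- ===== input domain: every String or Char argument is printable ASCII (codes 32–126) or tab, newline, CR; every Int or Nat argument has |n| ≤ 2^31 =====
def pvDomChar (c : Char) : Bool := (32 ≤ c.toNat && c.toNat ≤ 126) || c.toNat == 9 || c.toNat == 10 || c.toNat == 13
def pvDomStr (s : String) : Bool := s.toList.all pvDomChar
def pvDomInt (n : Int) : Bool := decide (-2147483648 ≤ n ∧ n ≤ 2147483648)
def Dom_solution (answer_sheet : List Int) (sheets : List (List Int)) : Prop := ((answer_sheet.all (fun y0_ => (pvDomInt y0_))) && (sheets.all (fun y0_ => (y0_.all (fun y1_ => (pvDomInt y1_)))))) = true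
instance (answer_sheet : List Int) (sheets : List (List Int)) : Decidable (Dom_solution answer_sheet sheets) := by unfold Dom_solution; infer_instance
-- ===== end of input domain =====

-- B differs from A structurally (hit list + count + run lengths vs. a flag/cnt state machine); equal return value on all of Pre_.

-- ===== PORT A =====
-- the body of A's innermost k-loop: state (doubt, cnt, continuity, flag)
def pvAStep (answer_sheet si sj : List Int) (st : Int × Int × Int × Bool) (k : Nat) : Int × Int × Int × Bool :=
  if si.getD k 0 ≠ sj.getD k 0 then
    (st.1, 0, st.2.2.1, false)                    -- flag = False; cnt = 0; continue
  else if answer_sheet.getD k 0 ≠ si.getD k 0 then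
    if st.2.2.2 then
      (st.1 + 1, st.2.1 + 1, max st.2.2.1 (st.2.1 + 1), true)
    else
      (st.1 + 1, 1, max st.2.2.1 1, true)
  else
    (st.1, 0, max st.2.2.1 0, false)

def solution (answer_sheet : List Int) (sheets : List (List Int)) : Int :=
  (List.range sheets.length).foldl (fun answer i =>
    (List.range sheets.length).foldl (fun answer j =>
      if j ≤ i then answer
      else
        let st := (List.range answer_sheet.length).foldl
          (pvAStep answer_sheet (sheets.getD i []) (sheets.getD j [])) (0, 0, 0, false)
        max answer (st.1 + st.2.2.1 ^ 2)) answer) (-1)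

-- ===== PORT B =====
-- hit[k] = sheets[i][k] == sheets[j][k] and answer_sheet[k] != sheets[i][k]
def pvHit (answer_sheet si sj : List Int) : List Bool :=
  (List.range answer_sheet.length).map (fun k =>
    decide (si.getD k 0 = sj.getD k 0) && decide (answer_sheet.getD k 0 ≠ si.getD k 0))

-- _run_lengths: collect the lengths of the maximal runs of True
def pvRunStep (st : List Int × Int) (h : Bool) : List Int × Int :=
  if h then (st.1, st.2 + 1)
  else if st.2 ≠ 0 then (st.1 ++ [st.2], 0) else (st.1, 0)

def pvRunLengths (hit : List Bool) : List Int :=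
  let st := hit.foldl pvRunStep ([], 0)
  if st.2 ≠ 0 then st.1 ++ [st.2] else st.1

def solution_alt (answer_sheet : List Int) (sheets : List (List Int)) : Int :=
  (List.range sheets.length).foldl (fun best i =>
    (List.range' (i + 1) (sheets.length - (i + 1))).foldl (fun best j =>
      let hit := pvHit answer_sheet (sheets.getD i []) (sheets.getD j [])
      let doubt : Int := (hit.count true : Nat)
      let continuity : Int := (PySem.List.max? ((0 : Int) :: pvRunLengths hit) (fun y => y)).getD 0
      max best (doubt + continuity ^ 2)) best) (-1)

-- ===== PRECONDITION & SPEC =====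
-- A (and B) raise IndexError exactly when the answer sheet is non-empty, there are at
-- least two sheets, and some sheet is shorter than the answer sheet; Pre_ excludes that.
def Pre_solution (answer_sheet : List Int) (sheets : List (List Int)) : Prop :=
  (answer_sheet.isEmpty || decide (sheets.length ≤ 1) ||
    sheets.all (fun s => decide (answer_sheet.length ≤ s.length))) = true
instance (answer_sheet : List Int) (sheets : List (List Int)) : Decidable (Pre_solution answer_sheet sheets) := by
  unfold Pre_solution; infer_instance

def pvWitness_solution : List Int × List (List Int) := ([1, 2], [[1, 1], [1, 1], [2, 2]])

def Spec_solution (answer_sheet : List Int) (sheets : List (List Int)) (out : Int) : Prop := out = solution_alt answer_sheet sheets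
instance (answer_sheet : List Int) (sheets : List (List Int)) (out : Int) : Decidable (Spec_solution answer_sheet sheets out) := by unfold Spec_solution; infer_instance

-- ===== CLAIM (what is proved, stated in full; the proofs are below) =====
def Claim_equal_solution : Prop := ∀ (answer_sheet : List Int) (sheets : List (List Int)), Dom_solution answer_sheet sheets → Pre_solution answer_sheet sheets → Spec_solution answer_sheet sheets (solution answer_sheet sheets)

-- ===== LEMMAS AND PROOFS =====

-- the abstract per-position step, a function of the hit bit only
def pvAbsStep (st : Int × Int × Int × Bool) (b : Bool) : Int × Int × Int × Bool :=
  if b then (st.1 + 1, st.2.1 + 1, max st.2.2.1 (st.2.1 + 1), true)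
  else (st.1, 0, st.2.2.1, false)

-- trailing run length of True, starting from prefix run c
def pvF : Int → List Bool → Int
  | c, [] => c
  | c, b :: bs => pvF (if b then c + 1 else 0) bs

-- running maximum m of run lengths, current run c
def pvM : Int → Int → List Bool → Int
  | _, m, [] => m
  | c, m, b :: bs => if b then pvM (c + 1) (max m (c + 1)) bs else pvM 0 m bs

theorem pvA_eq_abs (a si sj : List Int) (ks : List Nat) :
    ∀ (d c m : Int) (f : Bool), 0 ≤ c → c ≤ m → f = decide (c ≠ 0) →
    ks.foldl (pvAStep a si sj) (d, c, m, f) =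
    (ks.map (fun k => decide (si.getD k 0 = sj.getD k 0) && decide (a.getD k 0 ≠ si.getD k 0))).foldl
      pvAbsStep (d, c, m, f) := by
  induction ks with
  | nil => intro d c m f _ _ _; rfl
  | cons k ks ih =>
    intro d c m f hc hcm hf
    subst hf
    simp only [List.foldl_cons, List.map_cons]
    by_cases h1 : si[k]?.getD 0 = (sj[k]?.getD 0 : Int)
    · by_cases h2 : a[k]?.getD 0 = (si[k]?.getD 0 : Int)
      · -- positions agree and the student is right: both sides reset
        have hm0 : max m 0 = m := by omega
        have hA : pvAStep a si sj (d, c, m, decide (c ≠ 0)) k = (d, 0, m, false) := by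
          simp [pvAStep, h1, h2, hm0]
        have hB : pvAbsStep (d, c, m, decide (c ≠ 0))
            (decide (si.getD k 0 = sj.getD k 0) && decide (a.getD k 0 ≠ si.getD k 0)) =
            (d, 0, m, false) := by
          simp [pvAbsStep, h2]
        rw [hA, hB]
        exact ih d 0 m false le_rfl (le_trans hc hcm) (by simp)
      · -- a hit
        have h2' : ¬ a[k]?.getD 0 = (sj[k]?.getD 0 : Int) := by rw [← h1]; exact h2
        by_cases hc0 : c = 0
        · subst hc0
          have hA : pvAStep a si sj (d, 0, m, decide ((0 : Int) ≠ 0)) k =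
              (d + 1, 1, max m 1, true) := by
            simp [pvAStep, h1, h2']
          have hB : pvAbsStep (d, 0, m, decide ((0 : Int) ≠ 0))
              (decide (si.getD k 0 = sj.getD k 0) && decide (a.getD k 0 ≠ si.getD k 0)) =
              (d + 1, 1, max m 1, true) := by
            simp [pvAbsStep, h1, h2']
          rw [hA, hB]
          exact ih (d + 1) 1 (max m 1) true (by omega) (le_max_right m 1) (by simp)
        · have hA : pvAStep a si sj (d, c, m, decide (c ≠ 0)) k =
              (d + 1, c + 1, max m (c + 1), true) := by
            simp [pvAStep, h1, h2', hc0]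
          have hB : pvAbsStep (d, c, m, decide (c ≠ 0))
              (decide (si.getD k 0 = sj.getD k 0) && decide (a.getD k 0 ≠ si.getD k 0)) =
              (d + 1, c + 1, max m (c + 1), true) := by
            simp [pvAbsStep, h1, h2']
          rw [hA, hB]
          have h1ne : (c + 1) ≠ 0 := by omega
          exact ih (d + 1) (c + 1) (max m (c + 1)) true (by omega) (le_max_right m (c + 1))
            (by simp [h1ne])
    · -- the two sheets differ at k: both sides reset
      have hA : pvAStep a si sj (d, c, m, decide (c ≠ 0)) k = (d, 0, m, false) := by
        simp [pvAStep, h1]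
      have hB : pvAbsStep (d, c, m, decide (c ≠ 0))
          (decide (si.getD k 0 = sj.getD k 0) && decide (a.getD k 0 ≠ si.getD k 0)) =
          (d, 0, m, false) := by
        simp [pvAbsStep, h1]
      rw [hA, hB]
      exact ih d 0 m false le_rfl (le_trans hc hcm) (by simp)

theorem pvAbs_char (bs : List Bool) :
    ∀ (d c m : Int) (f : Bool), 0 ≤ c → f = decide (c ≠ 0) →
    bs.foldl pvAbsStep (d, c, m, f) =
    (d + ((bs.count true : Nat) : Int), pvF c bs, pvM c m bs, decide (pvF c bs ≠ 0)) := by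
  induction bs with
  | nil => intro d c m f _ hf; subst hf; simp [pvF, pvM]
  | cons b bs ih =>
    intro d c m f hc hf
    subst hf
    cases b with
    | true =>
      simp only [List.foldl_cons]
      have hB : pvAbsStep (d, c, m, decide (c ≠ 0)) true =
          (d + 1, c + 1, max m (c + 1), true) := by simp [pvAbsStep]
      rw [hB]
      have h1ne : (c + 1) ≠ 0 := by omega
      rw [ih (d + 1) (c + 1) (max m (c + 1)) true (by omega) (by simp [h1ne])]
      have hcnt : (d + 1) + (((bs.count true : Nat)) : Int) =
          d + ((((true :: bs).count true : Nat)) : Int) := by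
        simp [List.count_cons]
        omega
      rw [hcnt]
      simp [pvF, pvM]
    | false =>
      simp only [List.foldl_cons]
      have hB : pvAbsStep (d, c, m, decide (c ≠ 0)) false = (d, 0, m, false) := by
        simp [pvAbsStep]
      rw [hB]
      rw [ih d 0 m false le_rfl (by simp)]
      simp [pvF, pvM]

theorem pv_maxL_nonneg (rs : List Int) : 0 ≤ rs.foldl max 0 :=
  (PySem.List.le_foldl_max rs 0).1

theorem pvRun_char (bs : List Bool) :
    ∀ (rs : List Int) (c : Int), 0 ≤ c →
    (let st := bs.foldl pvRunStep (rs, c)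
     (if st.2 ≠ 0 then st.1 ++ [st.2] else st.1).foldl max 0) =
    pvM c (max (rs.foldl max 0) c) bs := by
  induction bs with
  | nil =>
    intro rs c hc
    simp only [List.foldl_nil, pvM]
    by_cases hc0 : c = 0
    · subst hc0
      have := pv_maxL_nonneg rs
      simp [max_eq_left this]
    · simp [hc0, List.foldl_append]
  | cons b bs ih =>
    intro rs c hc
    cases b with
    | true =>
      simp only [List.foldl_cons]
      have hstep : pvRunStep (rs, c) true = (rs, c + 1) := by simp [pvRunStep]
      rw [hstep]
      simp only [pvM]
      have hmm : max (max (rs.foldl max 0) c) (c + 1) = max (rs.foldl max 0) (c + 1) := by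
        omega
      rw [hmm]
      exact ih rs (c + 1) (by omega)
    | false =>
      simp only [List.foldl_cons]
      by_cases hc0 : c = 0
      · subst hc0
        have hstep : pvRunStep (rs, 0) false = (rs, 0) := by simp [pvRunStep]
        rw [hstep]
        simp only [pvM, if_neg Bool.false_ne_true]
        exact ih rs 0 le_rfl
      · have hstep : pvRunStep (rs, c) false = (rs ++ [c], 0) := by simp [pvRunStep, hc0]
        rw [hstep]
        simp only [pvM, if_neg Bool.false_ne_true]
        have hkey := ih (rs ++ [c]) 0 le_rfl
        have hfold : max ((rs ++ [c]).foldl max 0) 0 = max (rs.foldl max 0) c := by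
          have h1 : (rs ++ [c]).foldl max 0 = max (rs.foldl max 0) c := by
            simp [List.foldl_append]
          have := pv_maxL_nonneg rs
          omega
        rw [hfold] at hkey
        exact hkey

-- per-pair value: A's state machine result equals B's hit-list computation
theorem pv_pair_eq (a si sj : List Int) :
    ((List.range a.length).foldl (pvAStep a si sj) (0, 0, 0, false)).1 +
      ((List.range a.length).foldl (pvAStep a si sj) (0, 0, 0, false)).2.2.1 ^ 2 =
    (((pvHit a si sj).count true : Nat) : Int) +
      ((PySem.List.max? ((0 : Int) :: pvRunLengths (pvHit a si sj)) (fun y => y)).getD 0) ^ 2 := by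
  have hmax : (PySem.List.max? ((0 : Int) :: pvRunLengths (pvHit a si sj)) (fun y => y)).getD 0 =
      pvM 0 0 (pvHit a si sj) := by
    rw [PySem.List.max?_id_cons]
    have hrun := pvRun_char (pvHit a si sj) [] 0 le_rfl
    simpa [pvRunLengths] using hrun
  rw [hmax]
  rw [pvA_eq_abs a si sj (List.range a.length) 0 0 0 false le_rfl le_rfl (by simp),
      pvAbs_char _ 0 0 0 false le_rfl (by simp)]
  show (0 : Int) + (((pvHit a si sj).count true : Nat) : Int) + (pvM 0 0 (pvHit a si sj)) ^ 2 = _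
  ring

theorem pv_skip_fold (G : Int → Nat → Int) (n i : Nat) (hi : i < n) (a : Int) :
    (List.range n).foldl (fun acc j => if j ≤ i then acc else G acc j) a =
    (List.range' (i + 1) (n - (i + 1))).foldl G a := by
  have h1 : (i + 1) + (n - (i + 1)) = n := by omega
  have h2 := List.range'_append (s := 0) (m := i + 1) (n := n - (i + 1)) (step := 1)
  simp only [Nat.zero_add, Nat.one_mul] at h2
  have hsplit : List.range n = List.range' 0 (i + 1) ++ List.range' (i + 1) (n - (i + 1)) := by
    rw [List.range_eq_range', h2, h1]
  rw [hsplit, List.foldl_append]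
  have hfirst : ∀ (l : List Nat) (acc : Int), (∀ j ∈ l, j ≤ i) →
      l.foldl (fun acc j => if j ≤ i then acc else G acc j) acc = acc := by
    intro l
    induction l with
    | nil => intro acc _; rfl
    | cons x xs ih =>
      intro acc h
      simp only [List.foldl_cons, if_pos (h x List.mem_cons_self)]
      exact ih acc (fun j hj => h j (List.mem_cons_of_mem _ hj))
  rw [hfirst _ a (by intro j hj; simp [List.mem_range'_1] at hj; omega)]
  apply PySem.List.foldl_congr_mem
  intro acc j hj
  simp only [List.mem_range'_1] at hj
  have hji : ¬ j ≤ i := by omega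
  rw [if_neg hji]

theorem pv_inner_eq (a : List Int) (sheets : List (List Int)) (i : Nat)
    (hi : i < sheets.length) (acc : Int) :
    (List.range sheets.length).foldl (fun answer j =>
      if j ≤ i then answer
      else max answer
        (((List.range a.length).foldl (pvAStep a (sheets.getD i []) (sheets.getD j []))
            (0, 0, 0, false)).1 +
         ((List.range a.length).foldl (pvAStep a (sheets.getD i []) (sheets.getD j []))
            (0, 0, 0, false)).2.2.1 ^ 2)) acc =
    (List.range' (i + 1) (sheets.length - (i + 1))).foldl (fun best j =>
      max best ((((pvHit a (sheets.getD i []) (sheets.getD j [])).count true : Nat) : Int) +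
        ((PySem.List.max? ((0 : Int) :: pvRunLengths (pvHit a (sheets.getD i []) (sheets.getD j [])))
          (fun y => y)).getD 0) ^ 2)) acc := by
  rw [pv_skip_fold _ sheets.length i hi acc]
  apply PySem.List.foldl_congr_mem
  intro acc' j _
  rw [pv_pair_eq]

-- ===== VERDICT (by name: the statement is the Claim_ definition above) =====
theorem solution_spec : Claim_equal_solution := by
  intro answer_sheet sheets _ _
  unfold Spec_solution solution solution_alt
  apply PySem.List.foldl_congr_mem
  intro acc i hi
  rw [List.mem_range] at hi
  exact pv_inner_eq answer_sheet sheets i hi acc
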